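-- pv_equiv track=rewrite | github.com/katjpg/soundspace | core/space/annotate.py | extract_top_k_tags
-- ===== SOURCE A (Python) =====
-- import math
--
-- def extract_top_k_tags(tags: str | None, weights: str | None) -> tuple[str, ...]:
--     """Extract tags with maximum weight from comma-separated strings."""
--     if tags is None or (isinstance(tags, float) and math.isnan(tags)):
--         return ()
--
--     tag_list = [t.strip().lower() for t in str(tags).split(",") if t.strip()]
--     if not tag_list:
--         return ()
--
--     if weights is None or (isinstance(weights, float) and math.isnan(weights)):
--         return _dedupe(tag_list)
--
--     weight_strs = str(weights).split(",")
--     weight_list = []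
--     for w in weight_strs:
--         w = w.strip()
--         if w:
--             try:
--                 weight_list.append(int(w))
--             except ValueError:
--                 weight_list.append(0)
--
--     if len(weight_list) != len(tag_list):
--         return _dedupe(tag_list)
--
--     max_weight = max(weight_list)
--     top_tags = [tag_list[i] for i, w in enumerate(weight_list) if w == max_weight]
--     return _dedupe(top_tags)
--
-- def _dedupe(items: list[str]) -> tuple[str, ...]:
--     seen: set[str] = set()
--     out: list[str] = []
--     for item in items:
--         if item not in seen:
--             seen.add(item)
--             out.append(item)
--     return tuple(out)
-- ===== SOURCE B (Python) =====
-- import math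
--
-- def _to_int(s):
--     try:
--         return int(s)
--     except ValueError:
--         return 0
--
-- def extract_top_k_tags(tags: str | None, weights: str | None) -> tuple[str, ...]:
--     """Extract tags with maximum weight: one fused max+collect pass over the zipped pairs."""
--     if tags is None or (isinstance(tags, float) and math.isnan(tags)):
--         return ()
--     tag_list = [t.strip().lower() for t in str(tags).split(",") if t.strip()]
--     if not tag_list:
--         return ()
--     if weights is not None and not (isinstance(weights, float) and math.isnan(weights)):
--         weight_list = [_to_int(w.strip()) for w in str(weights).split(",") if w.strip()]
--         if len(weight_list) == len(tag_list):
--             best = weight_list[0]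
--             bucket = [tag_list[0]]
--             for tag, w in zip(tag_list[1:], weight_list[1:]):
--                 if w > best:
--                     best, bucket = w, [tag]
--                 elif w == best:
--                     bucket.append(tag)
--             tag_list = bucket
--     return tuple(dict.fromkeys(tag_list))
-- ===== Notes on version B (the rewrite author's own statement) =====
-- stated objective: alternative
-- what changed: Replaces A's two scans over the weights (max() then an index-based filtering comprehension) by a single fused pass over the zipped (tag, weight) pairs maintaining a running best weight and its tag bucket, and replaces the hand-rolled seen-set dedupe helper by dict.fromkeys.
import Mathlib
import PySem

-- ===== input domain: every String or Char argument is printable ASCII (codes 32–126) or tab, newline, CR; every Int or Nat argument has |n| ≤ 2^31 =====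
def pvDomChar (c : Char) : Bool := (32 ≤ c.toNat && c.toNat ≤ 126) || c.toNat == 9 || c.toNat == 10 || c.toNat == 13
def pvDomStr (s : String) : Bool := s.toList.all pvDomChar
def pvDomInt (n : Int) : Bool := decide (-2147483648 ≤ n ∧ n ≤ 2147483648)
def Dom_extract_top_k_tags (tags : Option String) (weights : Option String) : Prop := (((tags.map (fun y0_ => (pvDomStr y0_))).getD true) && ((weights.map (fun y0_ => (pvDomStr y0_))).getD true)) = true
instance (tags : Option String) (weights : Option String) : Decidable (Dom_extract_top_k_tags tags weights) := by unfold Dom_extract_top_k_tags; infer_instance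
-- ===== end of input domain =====

-- B replaces A's max()-scan-then-filter-scan by one fused pass keeping (best weight, bucket),
-- and A's hand-rolled seen-set dedupe by dict.fromkeys; objective: alternative decomposition.

-- ===== PORT A =====
-- port of _dedupe: seen set + output list, filled in one loop
def pvDedupeA (items : List String) : List String :=
  (items.foldl (fun (st : PySem.Set String × List String) item =>
      if !(PySem.Set.contains st.1 item) then (PySem.Set.add st.1 item, st.2 ++ [item]) else st)
    (PySem.Set.empty, [])).2

def extract_top_k_tags (tags : Option String) (weights : Option String) : List String :=
  match tags with
  | none => []
  | some tagsS =>
    let tag_list := ((PySem.Str.split? tagsS ",").getD []).filterMap (fun t =>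
        let s := PySem.Str.strip t
        if s = "" then none else some (PySem.Str.lower s))
    if tag_list = [] then []
    else
      match weights with
      | none => pvDedupeA tag_list
      | some ws =>
        let weight_strs := (PySem.Str.split? ws ",").getD []
        let weight_list := weight_strs.foldl (fun acc w =>
            let s := PySem.Str.strip w
            if s = "" then acc else acc ++ [(PySem.Int.ofStr? s).getD 0]) []
        if weight_list.length ≠ tag_list.length then pvDedupeA tag_list
        else
          let max_weight := (PySem.List.max? weight_list (fun y => y)).getD 0
          let top_tags := (PySem.List.enumerate weight_list).foldl (fun acc p =>
              if p.2 = max_weight then acc ++ [PySem.List.pyGetD tag_list p.1 ""] else acc) []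
          pvDedupeA top_tags

-- ===== PORT B =====
def extract_top_k_tags_alt (tags : Option String) (weights : Option String) : List String :=
  match tags with
  | none => []
  | some tagsS =>
    let tag_list := ((PySem.Str.split? tagsS ",").getD []).filterMap (fun t =>
        let s := PySem.Str.strip t
        if s = "" then none else some (PySem.Str.lower s))
    if tag_list = [] then []
    else
      let tl2 := match weights with
        | none => tag_list
        | some ws =>
          let weight_list := ((PySem.Str.split? ws ",").getD []).filterMap (fun w =>
              let s := PySem.Str.strip w
              if s = "" then none else some ((PySem.Int.ofStr? s).getD 0))
          if weight_list.length = tag_list.length then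
            match tag_list, weight_list with
            | t0 :: trest, w0 :: wrest =>
              ((trest.zip wrest).foldl (fun (st : Int × List String) p =>
                  if st.1 < p.2 then (p.2, [p.1])
                  else if p.2 = st.1 then (st.1, st.2 ++ [p.1])
                  else st) (w0, [t0])).2
            | _, _ => tag_list
          else tag_list
      PySem.List.dedup tl2

-- ===== PRECONDITION & SPEC =====
def Spec_extract_top_k_tags (tags : Option String) (weights : Option String) (out : List String) : Prop := out = extract_top_k_tags_alt tags weights
instance (tags : Option String) (weights : Option String) (out : List String) : Decidable (Spec_extract_top_k_tags tags weights out) := by unfold Spec_extract_top_k_tags; infer_instance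

-- ===== CLAIM (what is proved, stated in full; the proofs are below) =====
def Claim_equal_extract_top_k_tags : Prop := ∀ (tags : Option String) (weights : Option String), Dom_extract_top_k_tags tags weights → Spec_extract_top_k_tags tags weights (extract_top_k_tags tags weights)

-- ===== LEMMAS AND PROOFS =====

-- A's seen-set dedupe keeps exactly the set's own insertion order: both state components stay equal
theorem pvDedupeA_aux (items : List String) (s : PySem.Set String) :
    (items.foldl (fun (st : PySem.Set String × List String) item =>
      if !(PySem.Set.contains st.1 item) then (PySem.Set.add st.1 item, st.2 ++ [item]) else st)
      (s, (s : List String))) = (items.foldl PySem.Set.add s, items.foldl PySem.Set.add s) := by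
  induction items generalizing s with
  | nil => rfl
  | cons x xs ih =>
    simp only [List.foldl_cons]
    by_cases h : x ∈ s
    · simpa [h, PySem.Set.add, PySem.Set.contains] using ih s
    · simpa [h, PySem.Set.add, PySem.Set.contains] using ih (s ++ [x])

theorem pvDedupeA_eq_dedup (items : List String) : pvDedupeA items = PySem.List.dedup items := by
  simpa [pvDedupeA, PySem.List.dedup, PySem.Set.ofList, PySem.Set.empty] using
    congrArg Prod.snd (pvDedupeA_aux items PySem.Set.empty)

-- A's weight-parsing loop (append in a for-loop) computes B's comprehension (filterMap)
theorem pvWeights_foldl_eq_filterMap (l : List String) (acc : List Int) :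
    l.foldl (fun acc w =>
        let s := PySem.Str.strip w
        if s = "" then acc else acc ++ [(PySem.Int.ofStr? s).getD 0]) acc
      = acc ++ l.filterMap (fun w =>
        let s := PySem.Str.strip w
        if s = "" then none else some ((PySem.Int.ofStr? s).getD 0)) := by
  induction l generalizing acc with
  | nil => simp
  | cons x xs ih =>
    by_cases h : PySem.Str.strip x = "" <;> simp [h, ih]

-- A's enumerate/index filter over tl1 ++ tl2 as a zip filter
theorem pvEnumFilter (wl : List Int) (M : Int) :
    ∀ (tl1 tl2 : List String) (acc : List String), tl2.length = wl.length →
    (PySem.List.enumerate wl (tl1.length : Int)).foldl (fun acc p =>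
        if p.2 = M then acc ++ [PySem.List.pyGetD (tl1 ++ tl2) p.1 ""] else acc) acc
      = acc ++ ((tl2.zip wl).filter (fun p => p.2 = M)).map (·.1) := by
  induction wl with
  | nil => intro tl1 tl2 acc h; simp at h; simp [h, PySem.List.enumerate]
  | cons w ws ih =>
    intro tl1 tl2 acc h
    match tl2 with
    | [] => simp at h
    | y :: tl2' =>
      rw [PySem.List.enumerate_cons]
      have hget : PySem.List.pyGetD (tl1 ++ y :: tl2') (tl1.length : Int) "" = y := by
        rw [PySem.List.pyGetD_natCast]
        simp [List.getD]
      have harr : tl1 ++ y :: tl2' = (tl1 ++ [y]) ++ tl2' := by simp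
      have hlen : ((tl1.length : Int) + 1) = (((tl1 ++ [y]).length : Nat) : Int) := by simp
      simp only [List.foldl_cons, hget]
      rw [harr, hlen, ih (tl1 ++ [y]) tl2' _ (by simpa using h)]
      by_cases hw : w = M <;> simp [hw, List.zip_cons_cons]

-- B's fused best/bucket pass, characterized: best ends as the running max, bucket as the filter
theorem pvFused (zs : List (String × Int)) :
    ∀ (b : Int) (acc : List String),
    zs.foldl (fun (st : Int × List String) p =>
        if st.1 < p.2 then (p.2, [p.1])
        else if p.2 = st.1 then (st.1, st.2 ++ [p.1])
        else st) (b, acc)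
      = ((zs.map (·.2)).foldl max b,
         (if b = (zs.map (·.2)).foldl max b then acc else []) ++
           (zs.filter (fun p => p.2 = (zs.map (·.2)).foldl max b)).map (·.1)) := by
  induction zs with
  | nil => intro b acc; simp
  | cons p ps ih =>
    intro b acc
    obtain ⟨t, w⟩ := p
    simp only [List.foldl_cons, List.map_cons, List.filter_cons]
    by_cases h1 : b < w
    · have hmw : max b w = w := max_eq_right h1.le
      have hle : w ≤ (ps.map (·.2)).foldl max w := by
        have := (PySem.List.le_foldl_max (ps.map (·.2)) (max b w)).1
        rwa [hmw] at this
      have hbne : b ≠ (ps.map (·.2)).foldl max w := fun hb => absurd (hb ▸ hle) (not_le.mpr h1)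
      rw [if_pos h1, ih w [t]]; simp only [hmw]
      by_cases h2 : w = (ps.map (·.2)).foldl max w
      · simp only [if_neg hbne, if_pos h2]
        simp [← h2]
      · simp [hbne, h2]
    · have hmw : max b w = b := max_eq_left (not_lt.mp h1)
      have hle : b ≤ (ps.map (·.2)).foldl max b := by
        have := (PySem.List.le_foldl_max (ps.map (·.2)) (max b w)).1
        rwa [hmw] at this
      rw [if_neg h1]
      by_cases h2 : w = b
      · rw [if_pos h2, ih b (acc ++ [t])]; simp only [hmw]
        by_cases h3 : b = (ps.map (·.2)).foldl max b
        · have hwF : w = (ps.map (·.2)).foldl max b := h2.trans h3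
          simp only [if_pos h3, hwF, decide_true]
          simp [← hwF]
        · have hwF : w ≠ (ps.map (·.2)).foldl max b := fun hw => h3 (h2 ▸ hw)
          simp [h3, hwF]
      · rw [if_neg h2, ih b acc]; simp only [hmw]
        have hwlt : w < b := lt_of_le_of_ne (not_lt.mp h1) h2
        have hwne : w ≠ (ps.map (·.2)).foldl max b := by
          intro hw; rw [← hw] at hle; exact absurd hle (not_le.mpr hwlt)
        simp [hwne]

-- Python max(list) on a nonempty int list is the running max over the tail
def pvMaxStep (acc : Option Int) (x : Int) : Option Int :=
  match acc with
  | none => some x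
  | some m => if m < x then some x else some m

theorem pvMaxAux (ws : List Int) : ∀ (m : Int),
    ws.foldl pvMaxStep (some m) = some (ws.foldl max m) := by
  induction ws with
  | nil => intro m; rfl
  | cons w ws ih =>
    intro m
    simp only [List.foldl_cons, pvMaxStep]
    by_cases h : m < w
    · rw [if_pos h, ih, max_eq_right h.le]
    · rw [if_neg h, ih, max_eq_left (not_lt.mp h)]

theorem pvMaxHead (w : Int) (ws : List Int) :
    (PySem.List.max? (w :: ws) (fun y => y)).getD 0 = ws.foldl max w := by
  simp only [PySem.List.max?, List.foldl_cons]
  rw [List.foldl_ext _ pvMaxStep (some w) (fun a b _ => by cases a <;> rfl), pvMaxAux]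
  rfl

-- ===== VERDICT (by name: the statement is the Claim_ definition above) =====
theorem extract_top_k_tags_spec : Claim_equal_extract_top_k_tags := by
  intro tags weights _
  unfold Spec_extract_top_k_tags extract_top_k_tags extract_top_k_tags_alt
  cases tags with
  | none => rfl
  | some tagsS =>
    simp only
    generalize ((PySem.Str.split? tagsS ",").getD []).filterMap (fun t =>
        let s := PySem.Str.strip t
        if s = "" then none else some (PySem.Str.lower s)) = tl
    by_cases h0 : tl = []
    · simp [h0]
    · simp only [if_neg h0]
      cases weights with
      | none => exact pvDedupeA_eq_dedup tl
      | some ws =>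
        simp only
        rw [pvWeights_foldl_eq_filterMap, List.nil_append]
        generalize ((PySem.Str.split? ws ",").getD []).filterMap (fun w =>
            let s := PySem.Str.strip w
            if s = "" then none else some ((PySem.Int.ofStr? s).getD 0)) = wl
        by_cases hlen : wl.length = tl.length
        · simp only [if_neg (by omega : ¬ wl.length ≠ tl.length), if_pos hlen]
          match tl, wl, hlen with
          | [], _, _ => exact absurd rfl h0
          | t0 :: trest, [], hlen => simp at hlen
          | t0 :: trest, w0 :: wrest, hlen =>
            have hl : trest.length = wrest.length := by simpa using hlen.symm
            have hEF := pvEnumFilter (w0 :: wrest)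
                ((PySem.List.max? (w0 :: wrest) (fun y => y)).getD 0)
                [] (t0 :: trest) [] (by simpa using hlen.symm)
            simp only [List.length_nil, Nat.cast_zero, List.nil_append] at hEF
            rw [hEF, pvDedupeA_eq_dedup]
            show _ = PySem.List.dedup ((trest.zip wrest).foldl (fun (st : Int × List String) p =>
                  if st.1 < p.2 then (p.2, [p.1])
                  else if p.2 = st.1 then (st.1, st.2 ++ [p.1])
                  else st) (w0, [t0])).2
            rw [pvFused (trest.zip wrest) w0 [t0]]
            have hsnd : (trest.zip wrest).map (·.2) = wrest := by
              simpa using List.map_snd_zip (l₁ := trest) (l₂ := wrest) (by omega)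
            rw [hsnd, ← pvMaxHead w0 wrest]
            simp only [List.zip_cons_cons, List.filter_cons]
            by_cases hw0 : w0 = (PySem.List.max? (w0 :: wrest) fun y => y).getD 0
            · rw [if_pos (decide_eq_true hw0), if_pos hw0]; rfl
            · rw [if_neg (by simpa using hw0), if_neg hw0]; rfl
        · simp only [if_pos (by omega : wl.length ≠ tl.length), if_neg hlen]
          exact pvDedupeA_eq_dedup tl
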